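-- pv_equiv track=rewrite | github.com/ibrahim-Sobh/EPITA_course-materials | S2/Python Week challenge/P2DC_Team_13.py | Interlacing_Reverse_Second
-- ===== SOURCE A (Python) =====
-- def Interlacing_Reverse_Second(P1,P2):
--     New_List =[]
--     P2=P2[::-1]
--     New_List =[val for pair in zip(P1, P2) for val in pair]
--     if len(P1) > len(P2):
--         New_List=New_List+P1[len(P2):]
--     if len(P2) > len(P1):
--         New_List= New_List+P2[len(P1):]
--     return New_List
-- ===== SOURCE B (Python) =====
-- def Interlacing_Reverse_Second(P1, P2):
--     # Single index-driven pass: interleaving and leftover tails handled by one loop.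
--     R = P2[::-1]
--     out = []
--     for i in range(max(len(P1), len(R))):
--         if i < len(P1):
--             out.append(P1[i])
--         if i < len(R):
--             out.append(R[i])
--     return out
-- ===== Notes on version B (the rewrite author's own statement) =====
-- stated objective: alternative
-- what changed: Replaces the zip-comprehension plus two conditional slice-appending branches with one index-driven loop over range(max(len(P1),len(R))) that emits interleaved elements and leftover tails in the same pass.
import Mathlib
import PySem

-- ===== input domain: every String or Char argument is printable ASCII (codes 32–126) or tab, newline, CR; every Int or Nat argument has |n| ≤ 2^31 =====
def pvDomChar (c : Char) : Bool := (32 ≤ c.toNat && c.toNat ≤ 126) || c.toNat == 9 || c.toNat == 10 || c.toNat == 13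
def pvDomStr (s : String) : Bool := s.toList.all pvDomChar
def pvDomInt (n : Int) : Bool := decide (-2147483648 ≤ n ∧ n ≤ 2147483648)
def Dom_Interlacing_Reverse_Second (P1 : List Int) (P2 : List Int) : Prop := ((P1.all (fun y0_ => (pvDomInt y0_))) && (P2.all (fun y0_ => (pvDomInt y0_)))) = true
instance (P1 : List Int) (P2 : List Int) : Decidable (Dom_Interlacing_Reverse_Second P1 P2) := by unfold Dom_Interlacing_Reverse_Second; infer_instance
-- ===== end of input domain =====

-- B replaces A's zip-comprehension plus two conditional slice-appends with one index-driven loop (alternative decomposition, same cost).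


-- ===== PORT A =====
def Interlacing_Reverse_Second (P1 : List Int) (P2 : List Int) : List Int :=
  -- P2 = P2[::-1]  (step -1 is never 0, so slice? is some; getD [] is unreachable)
  let P2' := (PySem.List.slice? P2 none none (-1)).getD []
  -- New_List = [val for pair in zip(P1, P2) for val in pair]
  let newList := (P1.zip P2').flatMap (fun pair => [pair.1, pair.2])
  -- if len(P1) > len(P2): New_List = New_List + P1[len(P2):]
  let newList := if (P1.length : Int) > (P2'.length : Int) then
      newList ++ PySem.List.slice P1 (some (P2'.length : Int)) none else newList
  -- if len(P2) > len(P1): New_List = New_List + P2[len(P1):]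
  if (P2'.length : Int) > (P1.length : Int) then
      newList ++ PySem.List.slice P2' (some (P1.length : Int)) none else newList

-- ===== PORT B =====
def Interlacing_Reverse_Second_alt (P1 : List Int) (P2 : List Int) : List Int :=
  -- R = P2[::-1]
  let R := (PySem.List.slice? P2 none none (-1)).getD []
  -- for i in range(max(len(P1), len(R))): if i < len(P1): out.append(P1[i]); if i < len(R): out.append(R[i])
  (PySem.List.pyRange 0 (max (P1.length : Int) (R.length : Int)) 1).foldl
    (fun out i =>
      let out := if i < (P1.length : Int) then out ++ [PySem.List.pyGetD P1 i 0] else out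
      if i < (R.length : Int) then out ++ [PySem.List.pyGetD R i 0] else out)
    []

-- ===== PRECONDITION & SPEC =====
def Spec_Interlacing_Reverse_Second (P1 : List Int) (P2 : List Int) (out : List Int) : Prop := out = Interlacing_Reverse_Second_alt P1 P2
instance (P1 : List Int) (P2 : List Int) (out : List Int) : Decidable (Spec_Interlacing_Reverse_Second P1 P2 out) := by unfold Spec_Interlacing_Reverse_Second; infer_instance

-- ===== CLAIM (what is proved, stated in full; the proofs are below) =====
def Claim_equal_Interlacing_Reverse_Second : Prop := ∀ (P1 : List Int) (P2 : List Int), Dom_Interlacing_Reverse_Second P1 P2 → Spec_Interlacing_Reverse_Second P1 P2 (Interlacing_Reverse_Second P1 P2)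

-- ===== LEMMAS AND PROOFS =====

-- Proof-only reference function: interleave two lists, appending the longer one's tail.
def pvMerge : List Int → List Int → List Int
  | [], ys => ys
  | x :: xs, [] => x :: xs
  | x :: xs, y :: ys => x :: y :: pvMerge xs ys

-- A's zip-comprehension plus conditional tail slices equals pvMerge.
theorem pvMerge_eq (xs : List Int) : ∀ (ys : List Int),
    (let newList := (xs.zip ys).flatMap (fun pair => [pair.1, pair.2]);
     let newList := if (xs.length : Int) > (ys.length : Int) then
         newList ++ xs.drop ys.length else newList;
     if (ys.length : Int) > (xs.length : Int) then
         newList ++ ys.drop xs.length else newList) = pvMerge xs ys := by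
  induction xs with
  | nil =>
    intro ys
    cases ys <;> simp [pvMerge]
  | cons x xs ih =>
    intro ys
    cases ys with
    | nil => simp [pvMerge]
    | cons y ys =>
      have h := ih ys
      simp only [List.zip_cons_cons, List.flatMap_cons, List.length_cons,
        List.drop_succ_cons, pvMerge]
      push_cast
      simp only [show ((xs.length : Int) + 1 > (ys.length : Int) + 1) ↔ ((xs.length : Int) > (ys.length : Int)) from by omega,
          show ((ys.length : Int) + 1 > (xs.length : Int) + 1) ↔ ((ys.length : Int) > (xs.length : Int)) from by omega]
      simp only at h
      split_ifs at h ⊢ <;>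
        simp only [List.append_assoc, List.cons_append, List.nil_append] at h ⊢ <;>
        rw [h]

-- One full pass of guarded indexed emission over a single list is the list itself.
theorem pvFlat_self (l : List Int) :
    (List.range l.length).flatMap (fun k => if k < l.length then [l.getD k 0] else []) = l := by
  induction l with
  | nil => simp
  | cons x l ih =>
    rw [List.length_cons, List.range_succ_eq_map, List.flatMap_cons, List.flatMap_map]
    simp only [Nat.succ_lt_succ_iff, List.getD_cons_succ, Nat.zero_lt_succ,
      if_pos, List.getD_cons_zero]
    rw [ih]
    rfl

-- B's index loop body, flattened over range(max), equals pvMerge.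
theorem pvRange_flat (xs : List Int) : ∀ (ys : List Int),
    (List.range (max xs.length ys.length)).flatMap (fun k =>
      (if k < xs.length then [xs.getD k 0] else []) ++
      (if k < ys.length then [ys.getD k 0] else [])) = pvMerge xs ys := by
  induction xs with
  | nil =>
    intro ys
    simp only [List.length_nil, Nat.max_eq_right (Nat.zero_le _), Nat.not_lt_zero, pvMerge]
    simpa using pvFlat_self ys
  | cons x xs ih =>
    intro ys
    cases ys with
    | nil =>
      simp only [List.length_nil, Nat.max_eq_left (Nat.zero_le _), Nat.not_lt_zero]
      simpa using pvFlat_self (x :: xs)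
    | cons y ys =>
      have h := ih ys
      simp only [List.length_cons, Nat.succ_max_succ, List.range_succ_eq_map,
        List.flatMap_cons, List.flatMap_map, Nat.succ_lt_succ_iff,
        List.getD_cons_succ, Nat.zero_lt_succ, if_pos, List.getD_cons_zero, pvMerge]
      rw [h]
      rfl

-- A equals pvMerge on the reversed second list.
theorem pvA_eq (P1 P2 : List Int) :
    Interlacing_Reverse_Second P1 P2 = pvMerge P1 P2.reverse := by
  unfold Interlacing_Reverse_Second
  simp only [PySem.List.slice?_none_none_neg_one, Option.getD_some]
  rw [PySem.List.slice_from_natCast, PySem.List.slice_from_natCast]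
  exact pvMerge_eq P1 P2.reverse

-- B equals pvMerge on the reversed second list.
theorem pvB_eq (P1 P2 : List Int) :
    Interlacing_Reverse_Second_alt P1 P2 = pvMerge P1 P2.reverse := by
  unfold Interlacing_Reverse_Second_alt
  simp only [PySem.List.slice?_none_none_neg_one, Option.getD_some]
  rw [PySem.List.foldl_congr_mem _ _
    (fun out i => out ++
      ((if i < (P1.length : Int) then [PySem.List.pyGetD P1 i 0] else []) ++
       (if i < ((P2.reverse).length : Int) then [PySem.List.pyGetD P2.reverse i 0] else []))) _
    (by intro acc x _; dsimp only; split_ifs <;> simp [List.append_assoc])]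
  rw [PySem.List.foldl_append_eq_flatMap, List.nil_append]
  rw [show (max ((P1.length : Int)) ((P2.reverse.length : Int))) =
      ((max P1.length P2.reverse.length : Nat) : Int) from by push_cast; rfl]
  rw [PySem.List.pyRange_zero_natCast, List.flatMap_map]
  simp only [PySem.List.pyGetD_natCast, Nat.cast_lt]
  exact pvRange_flat P1 P2.reverse

-- ===== VERDICT (by name: the statement is the Claim_ definition above) =====
theorem Interlacing_Reverse_Second_spec : Claim_equal_Interlacing_Reverse_Second := by
  intro P1 P2 _
  unfold Spec_Interlacing_Reverse_Second
  rw [pvA_eq, pvB_eq]
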